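-- pv_equiv track=rewrite | github.com/Da20-Costa/CS50 | Week6/sentimental-credit/credit.py | multiplyAndSum
-- ===== SOURCE A (Python) =====
-- def multiplyAndSum(n):
--     multiply = n * 2
--     sum = 0
--     while multiply > 0:
--         last_digit = multiply % 10
--         sum += last_digit
--         multiply //= 10
--     return sum
-- ===== SOURCE B (Python) =====
-- def multiplyAndSum(n):
--     m = n * 2
--     if m <= 0:
--         return 0
--     return sum(int(c) for c in str(m))
-- ===== Notes on version B (the rewrite author's own statement) =====
-- stated objective: idiomatic
-- what changed: B sums the decimal-string characters of n*2 (with an explicit 0 for non-positive products) instead of extracting digits arithmetically with %10 and //=10 in a while loop.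
import Mathlib
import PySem

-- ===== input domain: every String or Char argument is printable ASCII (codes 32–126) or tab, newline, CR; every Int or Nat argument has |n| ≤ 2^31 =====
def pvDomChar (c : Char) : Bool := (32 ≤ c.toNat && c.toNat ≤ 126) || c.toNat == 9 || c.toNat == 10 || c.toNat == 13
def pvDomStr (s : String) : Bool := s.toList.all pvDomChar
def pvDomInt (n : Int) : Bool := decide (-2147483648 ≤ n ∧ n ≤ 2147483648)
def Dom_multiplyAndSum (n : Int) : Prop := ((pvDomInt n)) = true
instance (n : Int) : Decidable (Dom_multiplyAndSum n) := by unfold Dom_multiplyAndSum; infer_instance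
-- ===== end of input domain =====

-- B sums the decimal-string characters of n*2 instead of A's arithmetic %10 / //=10 while loop (idiomatic, same cost).

-- ===== PORT A =====
-- the while loop of A: state (multiply, sum)
def multiplyAndSumLoop (multiply : Int) (sum : Int) : Int :=
  if 0 < multiply then
    multiplyAndSumLoop (PySem.Int.floordiv multiply 10) (sum + PySem.Int.mod multiply 10)
  else sum
termination_by multiply.toNat
decreasing_by
  have h10 : PySem.Int.floordiv multiply 10 = multiply / 10 :=
    PySem.Int.floordiv_eq_ediv_of_pos (by omega)
  rw [h10]; omega

def multiplyAndSum (n : Int) : Int :=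
  multiplyAndSumLoop (n * 2) 0

-- ===== PORT B =====
-- int(c) for a decimal digit character c (the only characters str(m), m > 0, produces): exact there
def pvDigitVal (c : Char) : Int := (c.toNat : Int) - 48

def multiplyAndSum_alt (n : Int) : Int :=
  let m := n * 2
  if m ≤ 0 then 0
  else ((PySem.Int.toChars m).map pvDigitVal).sum

-- ===== PRECONDITION & SPEC =====
def Spec_multiplyAndSum (n : Int) (out : Int) : Prop := out = multiplyAndSum_alt n
instance (n : Int) (out : Int) : Decidable (Spec_multiplyAndSum n out) := by unfold Spec_multiplyAndSum; infer_instance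

-- ===== CLAIM (what is proved, stated in full; the proofs are below) =====
def Claim_equal_multiplyAndSum : Prop := ∀ (n : Int), Dom_multiplyAndSum n → Spec_multiplyAndSum n (multiplyAndSum n)

-- ===== LEMMAS AND PROOFS =====

-- digit sum of a natural number, least-significant digit first
def pvDigitSum (k : Nat) : Nat :=
  if k = 0 then 0 else k % 10 + pvDigitSum (k / 10)
decreasing_by exact Nat.div_lt_self (by omega) (by omega)

theorem pvDigitVal_digitChar (d : Nat) (hd : d < 10) :
    pvDigitVal (Nat.digitChar d) = (d : Int) := by
  interval_cases d <;> decide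

theorem pvToDigitsCore_sum (f : Nat) : ∀ (k : Nat) (acc : List Char), k < f →
    ((Nat.toDigitsCore 10 f k acc).map pvDigitVal).sum
      = (pvDigitSum k : Int) + (acc.map pvDigitVal).sum := by
  induction f with
  | zero => intro k acc h; omega
  | succ f ih =>
    intro k acc h
    rw [Nat.toDigitsCore]
    by_cases h0 : k / 10 = 0
    · rw [if_pos h0, List.map_cons, List.sum_cons,
        pvDigitVal_digitChar (k % 10) (by omega)]
      conv_rhs => rw [pvDigitSum]
      by_cases hk : k = 0
      · simp [hk]
      · rw [if_neg hk, h0, pvDigitSum]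
        push_cast; ring
    · rw [if_neg h0, ih (k / 10) _ (by omega), List.map_cons, List.sum_cons,
        pvDigitVal_digitChar (k % 10) (by omega)]
      conv_rhs => rw [pvDigitSum, if_neg (by omega : ¬ k = 0)]
      push_cast; ring

theorem pvLoop_eq (k : Nat) : ∀ (s : Int), multiplyAndSumLoop (k : Int) s = s + (pvDigitSum k : Int) := by
  induction k using Nat.strong_induction_on with
  | _ k ih =>
    intro s
    rw [multiplyAndSumLoop]
    by_cases hk : k = 0
    · subst hk; rw [pvDigitSum]; simp
    · rw [if_pos (by omega)]
      have hdiv : PySem.Int.floordiv (k : Int) 10 = ((k / 10 : Nat) : Int) := by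
        exact_mod_cast PySem.Int.floordiv_natCast k 10
      have hmod : PySem.Int.mod (k : Int) 10 = ((k % 10 : Nat) : Int) := by
        exact_mod_cast PySem.Int.mod_natCast k 10
      rw [hdiv, hmod, ih (k / 10) (Nat.div_lt_self (by omega) (by omega))]
      conv_rhs => rw [pvDigitSum, if_neg hk]
      push_cast; ring

-- ===== VERDICT (by name: the statement is the Claim_ definition above) =====
theorem multiplyAndSum_spec : Claim_equal_multiplyAndSum := by
  intro n _
  unfold Spec_multiplyAndSum multiplyAndSum multiplyAndSum_alt
  by_cases h : n * 2 ≤ 0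
  · rw [if_pos h, multiplyAndSumLoop, if_neg (by omega)]
  · rw [if_neg h]
    have hpos : 0 < n * 2 := by omega
    have hk : n * 2 = ((n * 2).toNat : Int) := by omega
    rw [hk, pvLoop_eq]
    have : PySem.Int.toChars ((((n * 2).toNat : Int))) = Nat.toDigits 10 (n * 2).toNat := by
      rw [PySem.Int.toChars, if_neg (by omega), Int.toNat_natCast]
    rw [this, Nat.toDigits, pvToDigitsCore_sum _ _ _ (by omega)]
    simp
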